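-- pv_equiv track=rewrite | github.com/OmKumar07/Talk2PDF | backend/query_new.py | select_best_answer
-- ===== SOURCE A (Python) =====
-- def select_best_answer(answer_candidates, question, intent):
--     """
--     Select the best answer from multiple candidates
--     """
--     if not answer_candidates:
--         return "No suitable answer could be generated."
--
--     # Score each candidate
--     scored_answers = []
--     for answer in answer_candidates:
--         score = 0
--
--         # Length score (prefer reasonable length)
--         length = len(answer)
--         if 50 <= length <= 500:
--             score += 20
--         elif 20 <= length <= 50:
--             score += 10
--         elif length > 500:
--             score += 15
--
--         # Keyword presence
--         for keyword in intent['keywords']: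
--             if keyword in answer.lower():
--                 score += 5
--
--         # Structure score
--         if answer.startswith(('Based on', 'According to', 'The document')):
--             score += 5
--         if '(Page' in answer:
--             score += 3
--
--         scored_answers.append((answer, score))
--
--     # Return best scored answer
--     scored_answers.sort(key=lambda x: x[1], reverse=True)
--     return scored_answers[0][0]
-- ===== SOURCE B (Python) =====
-- def select_best_answer(answer_candidates, question, intent):
--     """
--     Select the best answer from multiple candidates
--     (single-pass running-best selection instead of sort-then-take-first)
--     """
--     if not answer_candidates:
--         return "No suitable answer could be generated."
--
--     keywords = intent['keywords']
--
--     def score(answer):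
--         s = 0
--         n = len(answer)
--         if 50 <= n <= 500:
--             s += 20
--         elif 20 <= n <= 50:
--             s += 10
--         elif n > 500:
--             s += 15
--         low = answer.lower()
--         for kw in keywords:
--             if kw in low:
--                 s += 5
--         if answer.startswith(('Based on', 'According to', 'The document')):
--             s += 5
--         if '(Page' in answer:
--             s += 3
--         return s
--
--     best = answer_candidates[0]
--     best_score = score(best)
--     for cand in answer_candidates[1:]:
--         sc = score(cand)
--         if sc > best_score:  # strict: ties keep the earliest candidate, like the stable reverse sort
--             best, best_score = cand, sc
--     return best
-- ===== Notes on version B (the rewrite author's own statement) =====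
-- stated objective: simpler
-- what changed: Replaced building a scored list and stably sorting it in reverse just to read the first element by a single-pass running-best selection with strict '>' (so the earliest candidate wins ties exactly like the stable reverse sort); the per-candidate scoring heuristic is unchanged.
import Mathlib
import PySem

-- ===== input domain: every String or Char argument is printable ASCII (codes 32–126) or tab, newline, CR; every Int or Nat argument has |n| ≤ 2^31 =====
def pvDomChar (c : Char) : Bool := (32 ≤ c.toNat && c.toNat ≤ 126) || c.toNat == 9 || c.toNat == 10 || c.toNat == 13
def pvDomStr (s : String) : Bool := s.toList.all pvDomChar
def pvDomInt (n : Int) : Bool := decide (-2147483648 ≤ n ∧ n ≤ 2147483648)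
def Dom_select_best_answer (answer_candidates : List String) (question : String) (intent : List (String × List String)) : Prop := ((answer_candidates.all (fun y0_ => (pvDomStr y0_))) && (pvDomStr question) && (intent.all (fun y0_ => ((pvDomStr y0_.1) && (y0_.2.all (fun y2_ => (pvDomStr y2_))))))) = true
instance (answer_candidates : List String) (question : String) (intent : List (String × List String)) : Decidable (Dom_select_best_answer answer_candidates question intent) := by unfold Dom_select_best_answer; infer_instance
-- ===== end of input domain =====

-- B replaces A's build-score-list / stable-reverse-sort / take-first selection by a single-pass
-- running-best loop with strict '>' (same scoring heuristic): simpler selection, same result.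


-- ===== PORT A =====
-- intent['keywords'] (assoc-list dict, first match; the [] default is unreachable under Pre_:
-- Python raises KeyError there)
def pvKeywords (intent : List (String × List String)) : List String :=
  match intent.find? (fun p => p.1 == "keywords") with
  | some p => p.2
  | none => []

-- the per-candidate scoring block shared verbatim by both Pythons
def pvScore (keywords : List String) (answer : String) : Int :=
  let length : Int := PySem.Str.len answer
  let score : Int :=
    if 50 ≤ length ∧ length ≤ 500 then 20
    else if 20 ≤ length ∧ length ≤ 50 then 10
    else if 500 < length then 15
    else 0
  let score := keywords.foldl
    (fun s kw => if PySem.Str.isIn kw (PySem.Str.lower answer) then s + 5 else s) score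
  let score :=
    if PySem.Str.startswith answer "Based on" || PySem.Str.startswith answer "According to"
        || PySem.Str.startswith answer "The document" then score + 5 else score
  if PySem.Str.isIn "(Page" answer then score + 3 else score

def select_best_answer (answer_candidates : List String) (question : String) (intent : List (String × List String)) : String :=
  if answer_candidates = [] then "No suitable answer could be generated."
  else
    let kws := pvKeywords intent
    let scored := answer_candidates.foldl (fun acc a => acc ++ [(a, pvScore kws a)]) ([] : List (String × Int))
    let sortedL := PySem.List.sorted scored (fun x => x.2) true
    match PySem.List.pyGet? sortedL 0 with
    | some p => p.1
    | none => ""      -- unreachable: scored is nonempty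

-- ===== PORT B =====
def select_best_answer_alt (answer_candidates : List String) (question : String) (intent : List (String × List String)) : String :=
  match answer_candidates with
  | [] => "No suitable answer could be generated."
  | a :: rest =>
    let kws := pvKeywords intent
    (rest.foldl (fun best cand =>
        let sc := pvScore kws cand
        if best.2 < sc then (cand, sc) else best) (a, pvScore kws a)).1

-- ===== PRECONDITION & SPEC =====
-- Pre_ excludes exactly the inputs where Python A raises KeyError: a nonempty candidate list
-- with no 'keywords' key in intent.
def Pre_select_best_answer (answer_candidates : List String) (question : String) (intent : List (String × List String)) : Prop :=
  answer_candidates = [] ∨ "keywords" ∈ intent.map (·.1)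
instance (answer_candidates : List String) (question : String) (intent : List (String × List String)) : Decidable (Pre_select_best_answer answer_candidates question intent) := by unfold Pre_select_best_answer; infer_instance

def pvWitness_select_best_answer : List String × String × (List (String × List String)) :=
  (["Based on the text, yes. (Page 3)", "no"], "is it?", [("keywords", ["text", "yes"])])

def Spec_select_best_answer (answer_candidates : List String) (question : String) (intent : List (String × List String)) (out : String) : Prop := out = select_best_answer_alt answer_candidates question intent
instance (answer_candidates : List String) (question : String) (intent : List (String × List String)) (out : String) : Decidable (Spec_select_best_answer answer_candidates question intent out) := by unfold Spec_select_best_answer; infer_instance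

-- ===== CLAIM (what is proved, stated in full; the proofs are below) =====
def Claim_equal_select_best_answer : Prop := ∀ (answer_candidates : List String) (question : String) (intent : List (String × List String)), Dom_select_best_answer answer_candidates question intent → Pre_select_best_answer answer_candidates question intent → Spec_select_best_answer answer_candidates question intent (select_best_answer answer_candidates question intent)

-- ===== LEMMAS AND PROOFS =====

-- xs[0] on the list side is head?
theorem pyGet?_zero_head? {α : Type} (xs : List α) : PySem.List.pyGet? xs 0 = xs.head? := by
  cases xs <;> simp [PySem.List.pyGet?, PySem.List.pyIdx?]

-- the head of the stable reverse-sort insertion fold IS the strict running best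
theorem head_foldl_insertBy {α κ : Type} [LinearOrder κ] (key : α → κ) :
    ∀ (cs : List α) (b : α) (t : List α),
      (cs.foldl (fun acc x => PySem.List.insertBy (fun a y => decide (key y < key a)) x acc) (b :: t)).head?
        = some (cs.foldl (fun best c => if key best < key c then c else best) b) := by
  intro cs
  induction cs with
  | nil => intro b t; rfl
  | cons c cs ih =>
    intro b t
    simp only [List.foldl_cons]
    by_cases h : key b < key c
    · rw [show PySem.List.insertBy (fun a y => decide (key y < key a)) c (b :: t)
            = c :: b :: t from by simp [PySem.List.insertBy, h]]
      rw [ih c (b :: t)]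
      simp [h]
    · rw [show PySem.List.insertBy (fun a y => decide (key y < key a)) c (b :: t)
            = b :: PySem.List.insertBy (fun a y => decide (key y < key a)) c t from by
              simp [PySem.List.insertBy, h]]
      rw [ih b _]
      simp [h]

-- ===== VERDICT (by name: the statement is the Claim_ definition above) =====
theorem select_best_answer_spec : Claim_equal_select_best_answer := by
  intro ac q intent _ _
  unfold Spec_select_best_answer select_best_answer select_best_answer_alt
  cases ac with
  | nil => simp
  | cons a rest =>
    simp only [reduceCtorEq, if_false]
    rw [PySem.List.foldl_append_singleton_eq_map (fun x => (x, pvScore (pvKeywords intent) x))]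
    rw [PySem.List.sorted_rev_eq_foldl_insertBy]
    simp only [List.nil_append, List.map_cons, List.foldl_cons]
    rw [show PySem.List.insertBy
          (fun x y => decide (y.2 < x.2)) (a, pvScore (pvKeywords intent) a) ([] : List (String × Int))
          = [(a, pvScore (pvKeywords intent) a)] from by simp [PySem.List.insertBy]]
    rw [pyGet?_zero_head?]
    rw [show (fun (acc : List (String × Int)) (x : String × Int) =>
          PySem.List.insertBy (fun x y => decide (y.2 < x.2)) x acc)
        = (fun acc x => PySem.List.insertBy
            (fun x y => decide ((fun p : String × Int => p.2) y < (fun p : String × Int => p.2) x)) x acc)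
        from rfl]
    rw [head_foldl_insertBy (fun p : String × Int => p.2) (rest.map _)]
    simp [List.foldl_map]
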